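-- pv_equiv track=rewrite | github.com/JML-NHL-Stenden/FlexibleProductionTooling_IT2F | mqtt_bridge/instruction_steps_bridge.py | compute_progress
-- ===== SOURCE A (Python) =====
-- def compute_progress(steps):
--     """Return dict of product_id -> {'completed': X, 'total': Y}"""
--     progress = {}
--     for s in steps:
--         pid = s["projectId"]
--         if pid not in progress:
--             progress[pid] = {"completed": 0, "total": 0}
--         progress[pid]["total"] += 1
--         if s.get("detection_status"):
--             progress[pid]["completed"] += 1
--     return progress
-- ===== SOURCE B (Python) =====
-- def compute_progress(steps):
--     """Return dict of product_id -> {'completed': X, 'total': Y}"""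
--     groups = {}
--     for s in steps:
--         groups.setdefault(s["projectId"], []).append(s)
--     return {
--         pid: {"completed": sum(1 for s in g if s.get("detection_status")),
--               "total": len(g)}
--         for pid, g in groups.items()
--     }
-- ===== Notes on version B (the rewrite author's own statement) =====
-- stated objective: alternative
-- what changed: B first builds an insertion-ordered index grouping the step records by projectId, then derives each project's completed/total counts from its group in a second pass, instead of A's single interleaved loop that updates per-project counter dicts in place.
import Mathlib
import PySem

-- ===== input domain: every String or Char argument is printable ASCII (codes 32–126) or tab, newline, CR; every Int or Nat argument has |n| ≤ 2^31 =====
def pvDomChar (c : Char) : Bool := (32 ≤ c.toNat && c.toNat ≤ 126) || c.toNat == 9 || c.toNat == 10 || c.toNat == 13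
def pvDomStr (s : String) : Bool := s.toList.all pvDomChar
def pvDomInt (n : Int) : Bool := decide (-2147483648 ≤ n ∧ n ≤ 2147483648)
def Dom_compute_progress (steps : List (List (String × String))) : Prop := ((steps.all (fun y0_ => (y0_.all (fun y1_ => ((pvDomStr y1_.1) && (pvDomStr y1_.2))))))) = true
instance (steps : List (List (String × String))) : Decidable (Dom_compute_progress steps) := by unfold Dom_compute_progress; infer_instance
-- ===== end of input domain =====

-- B groups the records by projectId first and derives the counts per group in a second
-- pass, instead of A's interleaved in-place counter updates; equal cost, different shape.

-- ===== PORT A =====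
-- `if s.get("detection_status"):` — the value is a string, truthy iff present and nonempty
def cpDetected (s : List (String × String)) : Bool :=
  ((PySem.Dict.mk s).get? "detection_status").getD "" != ""

-- one iteration of A's loop body; `none` (KeyError on s["projectId"]) leaves the state
-- unchanged — those inputs are excluded by Pre_compute_progress
def cpAStep (progress : PySem.Dict String (PySem.Dict String Int))
    (s : List (String × String)) : PySem.Dict String (PySem.Dict String Int) :=
  match (PySem.Dict.mk s).get? "projectId" with
  | none => progress
  | some pid =>
    let progress1 :=
      if progress.contains pid then progress
      else progress.insert pid (PySem.Dict.mk [("completed", 0), ("total", 0)])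
    let progress2 :=
      progress1.modify pid (PySem.Dict.mk []) (fun d => d.modify "total" 0 (· + 1))
    if cpDetected s then
      progress2.modify pid (PySem.Dict.mk []) (fun d => d.modify "completed" 0 (· + 1))
    else progress2

def compute_progress (steps : List (List (String × String))) : List (String × List (String × Int)) :=
  ((steps.foldl cpAStep PySem.Dict.empty).items.map (fun p => (p.1, p.2.items)))

-- ===== PORT B =====
-- groups.setdefault(pid, []).append(s)  ≡  groups[pid] = groups.get(pid, []) + [s]
def cpBStep (groups : PySem.Dict String (List (List (String × String))))
    (s : List (String × String)) : PySem.Dict String (List (List (String × String))) :=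
  match (PySem.Dict.mk s).get? "projectId" with
  | none => groups
  | some pid => groups.modify pid [] (fun g => g ++ [s])

-- {"completed": sum(1 for s in g if s.get("detection_status")), "total": len(g)}
def cpSummary (g : List (List (String × String))) : List (String × Int) :=
  [("completed", (g.countP cpDetected : Int)), ("total", (g.length : Int))]

def compute_progress_alt (steps : List (List (String × String))) : List (String × List (String × Int)) :=
  let groups := steps.foldl cpBStep PySem.Dict.empty
  groups.items.map (fun p => (p.1, cpSummary p.2))

-- ===== PRECONDITION & SPEC =====
-- A raises KeyError on s["projectId"] for a record without that key; B raises there too.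
def Pre_compute_progress (steps : List (List (String × String))) : Prop :=
  (steps.all (fun s => (PySem.Dict.mk s).contains "projectId")) = true
instance (steps : List (List (String × String))) : Decidable (Pre_compute_progress steps) := by unfold Pre_compute_progress; infer_instance

def pvWitness_compute_progress : (List (List (String × String))) :=
  [[("projectId", "p1"), ("detection_status", "ok")], [("projectId", "p2")], [("projectId", "p1"), ("detection_status", "")]]

def Spec_compute_progress (steps : List (List (String × String))) (out : List (String × List (String × Int))) : Prop := out = compute_progress_alt steps
instance (steps : List (List (String × String))) (out : List (String × List (String × Int))) : Decidable (Spec_compute_progress steps out) := by unfold Spec_compute_progress; infer_instance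

-- ===== CLAIM (what is proved, stated in full; the proofs are below) =====
def Claim_equal_compute_progress : Prop := ∀ (steps : List (List (String × String))), Dom_compute_progress steps → Pre_compute_progress steps → Spec_compute_progress steps (compute_progress steps)

-- ===== LEMMAS AND PROOFS =====

-- the B-state determines the A-state: summarise every group
def cpSumm (g : List (List (String × String))) : PySem.Dict String Int :=
  PySem.Dict.mk (cpSummary g)

def cpMap (G : PySem.Dict String (List (List (String × String)))) :
    PySem.Dict String (PySem.Dict String Int) :=
  PySem.Dict.mk (G.items.map (fun p => (p.1, cpSumm p.2)))

lemma cpMap_contains (G : PySem.Dict String (List (List (String × String)))) (k : String) :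
    (cpMap G).contains k = G.contains k := by
  simp only [cpMap, PySem.Dict.contains, List.any_map]
  rfl

lemma cpMap_get? (G : PySem.Dict String (List (List (String × String)))) (k : String) :
    (cpMap G).get? k = (G.get? k).map cpSumm := by
  obtain ⟨l⟩ := G
  induction l with
  | nil => rfl
  | cons p rest ih =>
    by_cases hp : (p.1 == k) = true <;>
      simp_all [cpMap, PySem.Dict.get?]

lemma cpMap_insert (G : PySem.Dict String (List (List (String × String))))
    (k : String) (v : List (List (String × String))) :
    cpMap (G.insert k v) = (cpMap G).insert k (cpSumm v) := by
  simp only [PySem.Dict.insert, cpMap_contains]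
  by_cases h : G.contains k = true <;>
    simp [h, cpMap, List.map_map, Function.comp]
  intro a b _
  by_cases hab : a = k <;> simp [hab]

lemma cpSumm_append (g : List (List (String × String))) (s : List (String × String)) :
    cpSumm (g ++ [s]) =
      if cpDetected s then
        PySem.Dict.mk [("completed", (g.countP cpDetected : Int) + 1), ("total", (g.length : Int) + 1)]
      else
        PySem.Dict.mk [("completed", (g.countP cpDetected : Int)), ("total", (g.length : Int) + 1)] := by
  by_cases h : cpDetected s = true <;>
    simp [cpSumm, cpSummary, List.countP_append, h]

lemma cpStep_eq (G : PySem.Dict String (List (List (String × String))))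
    (s : List (String × String)) :
    cpAStep (cpMap G) s = cpMap (cpBStep G s) := by
  unfold cpAStep cpBStep
  cases hpid : (PySem.Dict.mk s).get? "projectId" with
  | none => rfl
  | some pid =>
    simp only [cpMap_contains]
    by_cases hc : G.contains pid = true
    · -- pid already grouped: G.get? pid = some g, B's modify is an overwrite
      obtain ⟨g, hg⟩ : ∃ g, G.get? pid = some g := by
        rw [PySem.Dict.contains_eq_isSome_get?] at hc
        exact Option.isSome_iff_exists.mp hc
      have hmg : (cpMap G).get? pid = some (cpSumm g) := by rw [cpMap_get?, hg]; rfl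
      have hB : G.modify pid [] (fun g => g ++ [s]) = G.insert pid (g ++ [s]) := by
        simp [PySem.Dict.modify, PySem.Dict.getD_eq_get?_getD, hg]
      have hA1 : (cpMap G).modify pid (PySem.Dict.mk [])
            (fun d => d.modify "total" 0 (· + 1))
          = (cpMap G).insert pid
              (PySem.Dict.mk [("completed", (g.countP cpDetected : Int)),
                              ("total", (g.length : Int) + 1)]) := by
        simp only [PySem.Dict.modify, PySem.Dict.getD_eq_get?_getD, hmg, Option.getD_some]
        rw [show cpSumm g = PySem.Dict.mk [("completed", (g.countP cpDetected : Int)),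
              ("total", (g.length : Int))] from rfl]
        rfl
      simp only [hc, if_true, hA1, hB, cpMap_insert, cpSumm_append]
      by_cases hd : cpDetected s = true <;>
        simp only [hd, if_true, if_false, Bool.false_eq_true, PySem.Dict.modify,
          PySem.Dict.getD_eq_get?_getD, PySem.Dict.get?_insert_self, Option.getD_some,
          PySem.Dict.insert_insert_self] <;> rfl
    · -- fresh pid: A creates {"completed": 0, "total": 0}, B starts the group at []
      have hg : G.get? pid = none := by
        rw [PySem.Dict.get?_eq_none_iff_contains]; simpa using hc
      have hB : G.modify pid [] (fun g => g ++ [s]) = G.insert pid ([] ++ [s]) := by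
        simp [PySem.Dict.modify, PySem.Dict.getD_eq_get?_getD, hg]
      have hA1 : ((cpMap G).insert pid (PySem.Dict.mk [("completed", 0), ("total", 0)])).modify
            pid (PySem.Dict.mk []) (fun d => d.modify "total" 0 (· + 1))
          = (cpMap G).insert pid (PySem.Dict.mk [("completed", 0), ("total", 1)]) := by
        simp only [PySem.Dict.modify, PySem.Dict.getD_eq_get?_getD,
          PySem.Dict.get?_insert_self, Option.getD_some, PySem.Dict.insert_insert_self]
        rfl
      simp only [hc, if_false, Bool.false_eq_true, hA1, hB, cpMap_insert, cpSumm_append]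
      by_cases hd : cpDetected s = true <;>
        simp only [hd, if_true, if_false, Bool.false_eq_true, PySem.Dict.modify,
          PySem.Dict.getD_eq_get?_getD, PySem.Dict.get?_insert_self, Option.getD_some,
          PySem.Dict.insert_insert_self] <;> rfl

lemma cpFold_eq (steps : List (List (String × String)))
    (G : PySem.Dict String (List (List (String × String)))) :
    steps.foldl cpAStep (cpMap G) = cpMap (steps.foldl cpBStep G) := by
  induction steps generalizing G with
  | nil => rfl
  | cons s rest ih => simp only [List.foldl_cons, cpStep_eq]; exact ih _

-- ===== VERDICT (by name: the statement is the Claim_ definition above) =====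
theorem compute_progress_spec : Claim_equal_compute_progress := by
  intro steps _ _
  show compute_progress steps = compute_progress_alt steps
  have h0 : (PySem.Dict.empty : PySem.Dict String (PySem.Dict String Int)) = cpMap PySem.Dict.empty := rfl
  unfold compute_progress compute_progress_alt
  rw [h0, cpFold_eq]
  simp [cpMap, List.map_map, Function.comp, cpSumm]
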